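-- pv_equiv track=rewrite | github.com/Romanchel1s/olympiad_programming | Tay_kita.py | TayKitWord
-- ===== SOURCE A (Python) =====
-- def TayKitWord(word):
--     new_word = ""
--     help_word = list(word)
--     if len(word)%2 == 0:
--         for i in range(len(word)):
--             n = len(help_word)// 2
--             new_word += help_word[n]
--             help_word.pop(n)
--     else:
--         for i in range(len(word)):
--             if len(help_word) % 2 == 0:
--                 n = len(help_word)// 2 - 1
--                 new_word += help_word[n]
--                 help_word.pop(n)
--             else:
--                 n = len(help_word)// 2
--                 new_word += help_word[n]
--                 help_word.pop(n)
--     return(new_word)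
-- ===== SOURCE B (Python) =====
-- def TayKitWord(word):
--     # O(n): closed form — the middle char, then chars alternating leftward/rightward
--     # from the centre, with the leftover left chars (for even length) at the end.
--     n = len(word)
--     m = n // 2
--     left = word[:m][::-1]
--     right = word[m+1:]
--     out = word[m:m+1]
--     for l, r in zip(left, right):
--         out += l + r
--     out += left[len(right):]
--     return out
-- ===== Notes on version B (the rewrite author's own statement) =====
-- stated objective: faster
-- what changed: Replaced the simulation loop that pops the middle of the remaining list n times with a closed form: the output is the middle character followed by the reversed left half interleaved with the right half (leftover left char last).
import Mathlib
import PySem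

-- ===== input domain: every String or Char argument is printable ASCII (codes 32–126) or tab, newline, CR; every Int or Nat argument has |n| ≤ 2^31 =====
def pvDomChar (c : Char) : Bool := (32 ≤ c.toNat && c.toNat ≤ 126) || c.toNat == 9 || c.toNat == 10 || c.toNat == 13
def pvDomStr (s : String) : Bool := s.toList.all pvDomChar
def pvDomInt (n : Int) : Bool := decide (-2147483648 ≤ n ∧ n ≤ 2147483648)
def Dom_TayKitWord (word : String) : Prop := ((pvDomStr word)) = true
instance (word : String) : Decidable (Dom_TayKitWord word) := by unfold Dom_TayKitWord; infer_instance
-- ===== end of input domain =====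

-- B replaces A's loop (popping the middle of the remaining list n times) by a closed form:
-- middle char, then reversed left half interleaved with the right half (leftover left char last).

-- ===== PORT A =====
-- even-length branch of A's loop: fuel = remaining iterations, acc = new_word, help = help_word
def pvGoEven : Nat → List Char → List Char → List Char
  | 0, acc, _ => acc
  | i + 1, acc, help =>
    -- n = len(help_word)//2 (len ≥ 0, so Nat division is exact);
    -- help_word[n]; help_word.pop(n) — pop? yields both the element and the popped list
    match PySem.List.pop? help ((help.length / 2 : Nat) : Int) with
    | some (c, rest) => pvGoEven i (acc ++ [c]) rest
    | none => acc

-- odd-length branch of A's loop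
def pvGoOdd : Nat → List Char → List Char → List Char
  | 0, acc, _ => acc
  | i + 1, acc, help =>
    if help.length % 2 == 0 then
      -- n = len//2 - 1: Nat subtraction; it differs from Python's int only at len = 0,
      -- where Python's help_word[-1] raises and pop? at 0 is none — both yield acc
      match PySem.List.pop? help ((help.length / 2 - 1 : Nat) : Int) with
      | some (c, rest) => pvGoOdd i (acc ++ [c]) rest
      | none => acc
    else
      match PySem.List.pop? help ((help.length / 2 : Nat) : Int) with
      | some (c, rest) => pvGoOdd i (acc ++ [c]) rest
      | none => acc

def TayKitWord (word : String) : String :=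
  let help := word.toList
  if help.length % 2 == 0 then
    String.ofList (pvGoEven help.length [] help)
  else
    String.ofList (pvGoOdd help.length [] help)

-- ===== PORT B =====
def TayKitWord_alt (word : String) : String :=
  let cs := word.toList
  let n := cs.length
  let m := n / 2
  let left := (cs.take m).reverse            -- word[:m][::-1]
  let right := cs.drop (m + 1)               -- word[m+1:]
  let out0 := (cs.drop m).take 1             -- word[m:m+1]
  let out := (left.zip right).foldl (fun a p => a ++ [p.1, p.2]) out0
  String.ofList (out ++ left.drop right.length)  -- + left[len(right):]

-- ===== PRECONDITION & SPEC =====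
def Spec_TayKitWord (word : String) (out : String) : Prop := out = TayKitWord_alt word
instance (word : String) (out : String) : Decidable (Spec_TayKitWord word out) := by unfold Spec_TayKitWord; infer_instance

-- ===== CLAIM (what is proved, stated in full; the proofs are below) =====
def Claim_equal_TayKitWord : Prop := ∀ (word : String), Dom_TayKitWord word → Spec_TayKitWord word (TayKitWord word)

-- ===== LEMMAS AND PROOFS =====

-- alternating right/left pick sequence produced by the even branch
def pvMixE : List Char → List Char → List Char
  | l :: ls, r :: rs => r :: l :: pvMixE ls rs
  | _, _ => []

-- alternating left/right pick sequence produced by the odd branch (after the centre)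
def pvMixO : List Char → List Char → List Char
  | l :: ls, r :: rs => l :: r :: pvMixO ls rs
  | _, _ => []

-- B's interleave with leftover left chars
def pvMixB : List Char → List Char → List Char
  | l :: ls, r :: rs => l :: r :: pvMixB ls rs
  | ls, [] => ls
  | [], _ => []

lemma pvMixO_eq_mixB (Lr R : List Char) (h : Lr.length = R.length) :
    pvMixO Lr R = pvMixB Lr R := by
  induction Lr generalizing R with
  | nil => cases R with
    | nil => rfl
    | cons r rs => simp at h
  | cons l ls ih => cases R with
    | nil => simp at h
    | cons r rs =>
      simp only [List.length_cons, Nat.add_right_cancel_iff] at h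
      simp [pvMixO, pvMixB, ih rs h]

lemma pvMixE_eq (Lr : List Char) (r : Char) (rs : List Char) (h : Lr.length = rs.length + 1) :
    pvMixE Lr (r :: rs) = r :: pvMixB Lr rs := by
  induction Lr generalizing r rs with
  | nil => simp at h
  | cons l ls ih =>
    cases rs with
    | nil =>
      have hnil : ls = [] := by
        cases ls with
        | nil => rfl
        | cons a as => simp at h
      subst hnil; rfl
    | cons r' rs' =>
      simp only [List.length_cons, Nat.add_right_cancel_iff] at h
      simp [pvMixE, pvMixB, ih r' rs' h]

lemma pvFoldZip (L R acc : List Char) :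
    ((L.zip R).foldl (fun a p => a ++ [p.1, p.2]) acc) ++ L.drop R.length
      = acc ++ pvMixB L R := by
  induction L generalizing R acc with
  | nil => cases R <;> simp [pvMixB]
  | cons l ls ih =>
    cases R with
    | nil => simp [pvMixB]
    | cons r rs =>
      simp only [List.zip_cons_cons, List.foldl_cons, List.length_cons, List.drop_succ_cons]
      rw [ih rs (acc ++ [l, r])]
      simp [pvMixB]

lemma pvPop_mid (pre : List Char) (x : Char) (post : List Char) :
    PySem.List.pop? (pre ++ x :: post) ((pre.length : Nat) : Int)
      = some (x, pre ++ post) := by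
  have hlt : pre.length < (pre ++ x :: post).length := by simp
  rw [PySem.List.pop?_natCast _ _ hlt]
  simp [List.eraseIdx_append_of_length_le (le_refl pre.length), List.getElem_append_right]

lemma pvGoEven_mix (Lr R acc : List Char) (h : Lr.length = R.length) :
    pvGoEven (Lr.length + R.length) acc (Lr.reverse ++ R) = acc ++ pvMixE Lr R := by
  induction Lr generalizing R acc with
  | nil =>
    cases R with
    | nil => simp [pvGoEven, pvMixE]
    | cons r rs => simp at h
  | cons l ls ih =>
    cases R with
    | nil => simp at h
    | cons r rs =>
      simp only [List.length_cons, Nat.add_right_cancel_iff] at h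
      have hfuel : (l :: ls).length + (r :: rs).length = ((ls.length + rs.length) + 1) + 1 := by
        simp only [List.length_cons]; omega
      rw [hfuel, pvGoEven]
      have hn1 : ((l :: ls).reverse ++ r :: rs).length / 2 = (l :: ls).reverse.length := by
        simp only [List.length_append, List.length_reverse, List.length_cons]; omega
      rw [hn1, pvPop_mid (l :: ls).reverse r rs]
      dsimp only
      have hre : (l :: ls).reverse ++ rs = ls.reverse ++ l :: rs := by simp
      rw [hre, pvGoEven]
      have hn2 : (ls.reverse ++ l :: rs).length / 2 = ls.reverse.length := by
        simp only [List.length_append, List.length_reverse, List.length_cons]; omega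
      rw [hn2, pvPop_mid ls.reverse l rs]
      dsimp only
      have := ih rs (acc ++ [r] ++ [l]) h
      rw [h] at this
      rw [h, this]
      simp [pvMixE]

lemma pvGoOdd_mix (Lr R acc : List Char) (h : Lr.length = R.length) :
    pvGoOdd (Lr.length + R.length) acc (Lr.reverse ++ R) = acc ++ pvMixO Lr R := by
  induction Lr generalizing R acc with
  | nil =>
    cases R with
    | nil => simp [pvGoOdd, pvMixO]
    | cons r rs => simp at h
  | cons l ls ih =>
    cases R with
    | nil => simp at h
    | cons r rs =>
      simp only [List.length_cons, Nat.add_right_cancel_iff] at h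
      have hfuel : (l :: ls).length + (r :: rs).length = ((ls.length + rs.length) + 1) + 1 := by
        simp only [List.length_cons]; omega
      rw [hfuel, pvGoOdd]
      have hpar : (((l :: ls).reverse ++ r :: rs).length % 2 == 0) = true := by
        simp only [beq_iff_eq, List.length_append, List.length_reverse, List.length_cons]; omega
      rw [if_pos hpar]
      have hn1 : ((l :: ls).reverse ++ r :: rs).length / 2 - 1 = ls.reverse.length := by
        simp only [List.length_append, List.length_reverse, List.length_cons]; omega
      rw [hn1]
      have hsplit : (l :: ls).reverse ++ r :: rs = ls.reverse ++ l :: (r :: rs) := by simp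
      rw [hsplit, pvPop_mid ls.reverse l (r :: rs)]
      dsimp only
      rw [pvGoOdd]
      have hpar2 : ((ls.reverse ++ r :: rs).length % 2 == 0) = false := by
        simp only [beq_eq_false_iff_ne, ne_eq, List.length_append, List.length_reverse,
          List.length_cons]; omega
      rw [if_neg (ne_true_of_eq_false hpar2)]
      have hn2 : (ls.reverse ++ r :: rs).length / 2 = ls.reverse.length := by
        simp only [List.length_append, List.length_reverse, List.length_cons]; omega
      rw [hn2, pvPop_mid ls.reverse r rs]
      dsimp only
      have := ih rs (acc ++ [l] ++ [r]) h
      rw [h] at this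
      rw [h, this]
      simp [pvMixO]

lemma pvGoOdd_top (Lr : List Char) (c : Char) (R acc : List Char) (h : Lr.length = R.length) :
    pvGoOdd (Lr.length + R.length + 1) acc (Lr.reverse ++ c :: R) = acc ++ c :: pvMixO Lr R := by
  rw [pvGoOdd]
  have hpar : ((Lr.reverse ++ c :: R).length % 2 == 0) = false := by
    simp only [beq_eq_false_iff_ne, ne_eq, List.length_append, List.length_reverse,
      List.length_cons]; omega
  rw [if_neg (ne_true_of_eq_false hpar)]
  have hn : (Lr.reverse ++ c :: R).length / 2 = Lr.reverse.length := by
    simp only [List.length_append, List.length_reverse, List.length_cons]; omega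
  rw [hn, pvPop_mid Lr.reverse c R]
  dsimp only
  rw [pvGoOdd_mix Lr R (acc ++ [c]) h]
  simp

-- ===== VERDICT (by name: the statement is the Claim_ definition above) =====
theorem TayKitWord_spec : Claim_equal_TayKitWord := by
  intro word _
  unfold Spec_TayKitWord TayKitWord TayKitWord_alt
  simp only
  generalize word.toList = cs
  set m := cs.length / 2 with hmdef
  have hmle : m ≤ cs.length := Nat.div_le_self _ _
  have hLr : ((cs.take m).reverse).length = m := by simp; omega
  by_cases hpar : cs.length % 2 = 0
  · rw [if_pos (by simpa using hpar)]
    cases hR : cs.drop m with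
    | nil =>
      have hn0 : cs.length = 0 := by
        have := congrArg List.length hR
        simp at this; omega
      have hcsnil : cs = [] := List.length_eq_zero_iff.mp hn0
      subst hcsnil
      simp [pvGoEven]
    | cons r rs =>
      have hrs : rs.length = cs.length - m - 1 := by
        have := congrArg List.length hR
        simp at this; omega
      have hpos : 0 < cs.length := by
        rcases Nat.eq_zero_or_pos cs.length with h0 | h0
        · have : cs = [] := List.length_eq_zero_iff.mp h0
          subst this; simp at hR
        · exact h0
      have hlen : ((cs.take m).reverse).length = (r :: rs).length := by
        rw [hLr]; simp; omega
      have hcat : cs.take m ++ r :: rs = cs := by rw [← hR]; exact List.take_append_drop m cs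
      have hmix := pvGoEven_mix ((cs.take m).reverse) (r :: rs) [] hlen
      rw [List.reverse_reverse, hcat] at hmix
      rw [show ((cs.take m).reverse).length + (r :: rs).length = cs.length from by
        rw [hLr]; simp; omega] at hmix
      rw [hmix]
      have hright : cs.drop (m + 1) = rs := by rw [← List.tail_drop, hR]; rfl
      rw [hright]
      simp only [List.take_succ_cons, List.take_zero]
      rw [pvFoldZip ((cs.take m).reverse) rs [r],
        pvMixE_eq ((cs.take m).reverse) r rs (by rw [hLr]; omega)]
      simp
  · rw [if_neg (by simpa using hpar)]
    have hmlt : m < cs.length := by omega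
    cases hR : cs.drop m with
    | nil =>
      have := congrArg List.length hR
      simp at this; omega
    | cons c R =>
      have hRl : R.length = cs.length - m - 1 := by
        have := congrArg List.length hR
        simp at this; omega
      have hlen : ((cs.take m).reverse).length = R.length := by rw [hLr]; omega
      have hcat : cs.take m ++ c :: R = cs := by rw [← hR]; exact List.take_append_drop m cs
      have hmix := pvGoOdd_top ((cs.take m).reverse) c R [] hlen
      rw [List.reverse_reverse, hcat] at hmix
      rw [show ((cs.take m).reverse).length + R.length + 1 = cs.length from by
        rw [hLr]; omega] at hmix
      rw [hmix]
      have hright : cs.drop (m + 1) = R := by rw [← List.tail_drop, hR]; rfl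
      rw [hright]
      simp only [List.take_succ_cons, List.take_zero]
      rw [pvFoldZip ((cs.take m).reverse) R [c],
        pvMixO_eq_mixB ((cs.take m).reverse) R hlen]
      simp
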